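-- pv_equiv track=rewrite | github.com/Yoriz/advent-of-code-2023 | day09.py | yield_pairs
-- ===== SOURCE A (Python) =====
-- import collections
--
-- def yield_pairs(values: collections.deque, backwards: bool = False):
--     if backwards:
--         values = values.copy()
--         values.reverse()
--     new_values = iter(values)
--     first = next(new_values)
--     for next_ in new_values:
--         yield first, next_
--         first = next_
-- ===== SOURCE B (Python) =====
-- import collections
--
--
-- def yield_pairs(values: collections.deque, backwards: bool = False):
--     n = len(values)
--     if backwards:
--         for i in range(n - 1, 0, -1):
--             yield values[i], values[i - 1]
--     else:
--         for i in range(n - 1):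
--             yield values[i], values[i + 1]
-- ===== Notes on version B (the rewrite author's own statement) =====
-- stated objective: alternative
-- what changed: Replaces the iterator consumption with a previous-element accumulator (and copy+reverse for backwards) by pure index arithmetic: random access values[i] over an index range, with the backwards case realised by a descending range instead of reversing the deque.
import Mathlib
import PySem

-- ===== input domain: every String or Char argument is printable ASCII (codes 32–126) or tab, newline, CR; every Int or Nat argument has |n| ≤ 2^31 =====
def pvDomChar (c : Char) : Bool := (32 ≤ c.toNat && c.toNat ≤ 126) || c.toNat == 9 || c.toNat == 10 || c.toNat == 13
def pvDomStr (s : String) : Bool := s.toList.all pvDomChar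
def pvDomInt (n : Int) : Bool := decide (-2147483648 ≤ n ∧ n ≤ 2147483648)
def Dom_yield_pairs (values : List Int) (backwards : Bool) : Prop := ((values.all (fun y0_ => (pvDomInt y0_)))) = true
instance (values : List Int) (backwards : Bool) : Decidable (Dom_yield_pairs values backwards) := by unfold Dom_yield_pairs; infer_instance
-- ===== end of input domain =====

-- B replaces A's iterator-with-accumulator (and copy+reverse for backwards) by pure
-- index arithmetic over a range, descending for the backwards case (alternative).

-- ===== PORT A =====
-- A's for-loop: carry `first`, emit (first, next_) for each remaining element.
def yieldPairsLoop (first : Int) (rest : List Int) : List (Int × Int) :=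
  match rest with
  | [] => []
  | next_ :: t => (first, next_) :: yieldPairsLoop next_ t

def yield_pairs (values : List Int) (backwards : Bool) : List (Int × Int) :=
  let vs := if backwards then values.reverse else values
  match vs with
  | [] => []          -- in Python `next(new_values)` raises here; excluded by Pre_
  | first :: rest => yieldPairsLoop first rest

-- ===== PORT B =====
-- index loop: for i in range(n-1): yield values[i], values[i+1]
-- backwards:  for i in range(n-1, 0, -1): yield values[i], values[i-1]
def yield_pairs_alt (values : List Int) (backwards : Bool) : List (Int × Int) :=
  let n : Int := values.length
  if backwards then
    (PySem.List.pyRange (n - 1) 0 (-1)).map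
      (fun i => (PySem.List.pyGetD values i 0, PySem.List.pyGetD values (i - 1) 0))
  else
    (PySem.List.pyRange 0 (n - 1) 1).map
      (fun i => (PySem.List.pyGetD values i 0, PySem.List.pyGetD values (i + 1) 0))

-- ===== PRECONDITION & SPEC =====
-- On an empty deque A's bare next() raises (RuntimeError); excluded.
def Pre_yield_pairs (values : List Int) (backwards : Bool) : Prop := values ≠ []
instance (values : List Int) (backwards : Bool) : Decidable (Pre_yield_pairs values backwards) := by unfold Pre_yield_pairs; infer_instance
def pvWitness_yield_pairs : List Int × Bool := ([1, 3, 6, 10], false)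

def Spec_yield_pairs (values : List Int) (backwards : Bool) (out : List (Int × Int)) : Prop := out = yield_pairs_alt values backwards
instance (values : List Int) (backwards : Bool) (out : List (Int × Int)) : Decidable (Spec_yield_pairs values backwards out) := by unfold Spec_yield_pairs; infer_instance

-- ===== CLAIM (what is proved, stated in full; the proofs are below) =====
def Claim_equal_yield_pairs : Prop := ∀ (values : List Int) (backwards : Bool), Dom_yield_pairs values backwards → Pre_yield_pairs values backwards → Spec_yield_pairs values backwards (yield_pairs values backwards)
-- ===== LEMMAS AND PROOFS =====
-- A's accumulator loop produces the consecutive pairs of its input list.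
theorem yieldPairsLoop_eq_zip (first : Int) (rest : List Int) :
    yieldPairsLoop first rest = List.zip (first :: rest) rest := by
  induction rest generalizing first with
  | nil => rfl
  | cons x t ih => simp [yieldPairsLoop, List.zip, ih x]

-- B's forward index loop computes the consecutive pairs of vs.
theorem pairs_fwd (vs : List Int) :
    ((PySem.List.pyRange 0 ((vs.length : Int) - 1) 1).map
      (fun i => (PySem.List.pyGetD vs i 0, PySem.List.pyGetD vs (i + 1) 0)))
      = List.zip vs vs.tail := by
  rw [PySem.List.pyRange_one]
  apply List.ext_getElem
  · simp only [List.length_map, List.length_range, List.length_zip, List.length_tail]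
    omega
  · intro k hk1 hk2
    simp only [List.length_map, List.length_range] at hk1
    have hk : k < vs.length - 1 := by omega
    simp only [List.map_map, List.getElem_map, List.getElem_range, Function.comp_apply,
      zero_add, List.getElem_zip]
    have e1 : ((k : Int)).toNat = k := by omega
    have e2 : ((k : Int) + 1).toNat = k + 1 := by omega
    rw [PySem.List.pyGetD_eq_getElem vs (i := (k:Int)) 0 (by omega) (by omega),
        PySem.List.pyGetD_eq_getElem vs (i := (k:Int)+1) 0 (by omega) (by omega)]
    simp only [e1, e2]
    congr 1
    simp [List.getElem_tail]

-- B's descending index loop computes the consecutive pairs of vs.reverse.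
theorem pairs_bwd (vs : List Int) :
    ((PySem.List.pyRange ((vs.length : Int) - 1) 0 (-1)).map
      (fun i => (PySem.List.pyGetD vs i 0, PySem.List.pyGetD vs (i - 1) 0)))
      = List.zip vs.reverse vs.reverse.tail := by
  rw [PySem.List.pyRange_neg_one]
  apply List.ext_getElem
  · simp only [List.length_map, List.length_range, List.length_zip, List.length_tail,
      List.length_reverse]
    omega
  · intro k hk1 hk2
    simp only [List.length_map, List.length_range] at hk1
    have hk : k < vs.length - 1 := by omega
    simp only [List.map_map, List.getElem_map, List.getElem_range, Function.comp_apply,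
      List.getElem_zip]
    have e1 : ((vs.length : Int) - 1 - (k : Int)).toNat = vs.length - 1 - k := by omega
    have e2 : ((vs.length : Int) - 1 - (k : Int) - 1).toNat = vs.length - 1 - (k + 1) := by omega
    rw [PySem.List.pyGetD_eq_getElem vs (i := (vs.length : Int) - 1 - (k:Int)) 0 (by omega) (by omega),
        PySem.List.pyGetD_eq_getElem vs (i := (vs.length : Int) - 1 - (k:Int) - 1) 0 (by omega) (by omega)]
    simp only [e1, e2]
    congr 1
    · rw [List.getElem_reverse]
    · rw [List.getElem_tail, List.getElem_reverse]

-- ===== VERDICT (by name: the statement is the Claim_ definition above) =====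
theorem yield_pairs_spec : Claim_equal_yield_pairs := by
  intro values backwards _ hpre
  unfold Spec_yield_pairs yield_pairs yield_pairs_alt
  cases backwards with
  | false =>
    simp only [Bool.false_eq_true, if_false]
    rw [pairs_fwd]
    cases values with
    | nil => exact absurd rfl hpre
    | cons f t => simp [yieldPairsLoop_eq_zip]
  | true =>
    simp only [if_true]
    rw [pairs_bwd]
    cases values.reverse with
    | nil => simp
    | cons f t => simp [yieldPairsLoop_eq_zip]
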